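-- pv_equiv track=rewrite | github.com/yanpro89962976307-lgtm/python-homework-tasks | task1/solution.py | get_circular_path
-- ===== SOURCE A (Python) =====
-- def get_circular_path(n, m):
--     path = []
--     current = 1
--
--     while True:
--         path.append(str(current))
--         current = (current + m - 2) % n + 1
--
--         if current == 1:
--             break
--
--     return "".join(path)
-- ===== SOURCE B (Python) =====
-- def _gcd(a, b):
--     while b:
--         a, b = b, a % b
--     return a
--
-- def get_circular_path(n, m):
--     d = (m - 1) % n  # ZeroDivisionError when n == 0, like the original
--     g = _gcd(abs(n), abs(d))
--     period = abs(n) // g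
--     return "".join(str(k * d % n + 1) for k in range(period))
-- ===== Notes on version B (the rewrite author's own statement) =====
-- stated objective: alternative
-- what changed: B replaces A's step-until-current-returns-to-1 loop by computing the cycle length |n|/gcd(|n|,|(m-1)%n|) up front and emitting each position via the closed form k*(m-1)%n+1 over range(period).
import Mathlib
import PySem

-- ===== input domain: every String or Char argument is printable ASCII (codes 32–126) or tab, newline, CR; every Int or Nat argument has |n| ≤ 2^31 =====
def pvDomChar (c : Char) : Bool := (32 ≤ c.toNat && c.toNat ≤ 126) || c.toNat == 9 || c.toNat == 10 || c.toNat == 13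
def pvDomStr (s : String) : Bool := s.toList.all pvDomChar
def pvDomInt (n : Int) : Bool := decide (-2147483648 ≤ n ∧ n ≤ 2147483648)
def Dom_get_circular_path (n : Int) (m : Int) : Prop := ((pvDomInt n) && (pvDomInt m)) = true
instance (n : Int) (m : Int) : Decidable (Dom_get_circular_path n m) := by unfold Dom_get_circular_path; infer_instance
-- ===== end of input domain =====

-- B replaces A's step-until-back-to-1 loop by a gcd-derived cycle length and a direct
-- closed-form comprehension over range(period) (objective: alternative decomposition).

-- ===== PORT A =====
-- A's `while True` loop; fuel |n| is an upper bound on the number of iterations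
-- (the cycle length divides |n|, proved below), so the port is exact for n ≠ 0.
def loopA (n m : Int) : Nat → Int → List String → List String
  | 0, _, path => path
  | fuel+1, current, path =>
    let path' := path ++ [PySem.Int.toStr current]
    let current' := PySem.Int.mod (current + m - 2) n + 1
    if current' = 1 then path' else loopA n m fuel current' path'

def get_circular_path (n : Int) (m : Int) : String :=
  PySem.Str.join "" (loopA n m n.natAbs 1 [])

-- ===== PORT B =====
-- termination measure for the hand-written Euclid loop `_gcd` of Source B
theorem pmod_natAbs_lt (a : Int) {b : Int} (hb : b ≠ 0) :
    (PySem.Int.mod a b).natAbs < b.natAbs := by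
  rcases lt_or_gt_of_ne hb with h | h
  · have := PySem.Int.mod_neg_bounds a h; omega
  · have h1 := PySem.Int.mod_nonneg a h
    have h2 := PySem.Int.mod_lt a h; omega

-- Source B's `_gcd`: while b: a, b = b, a % b
def gcdLoop (a b : Int) : Int :=
  if hb : b = 0 then a
  else gcdLoop b (PySem.Int.mod a b)
  termination_by b.natAbs
  decreasing_by exact pmod_natAbs_lt a hb

def get_circular_path_alt (n : Int) (m : Int) : String :=
  let d := PySem.Int.mod (m - 1) n
  let g := gcdLoop |n| |d|
  let period := PySem.Int.floordiv |n| g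
  PySem.Str.join ""
    ((PySem.List.pyRange 0 period 1).map (fun k => PySem.Int.toStr (PySem.Int.mod (k * d) n + 1)))

-- ===== PRECONDITION & SPEC =====
-- Pre_ excludes exactly n = 0, where the Python A raises ZeroDivisionError.
def Pre_get_circular_path (n : Int) (m : Int) : Prop := n ≠ 0
instance (n : Int) (m : Int) : Decidable (Pre_get_circular_path n m) := by
  unfold Pre_get_circular_path; infer_instance
def pvWitness_get_circular_path : Int × Int := (5, 3)

def Spec_get_circular_path (n : Int) (m : Int) (out : String) : Prop := out = get_circular_path_alt n m
instance (n : Int) (m : Int) (out : String) : Decidable (Spec_get_circular_path n m out) := by unfold Spec_get_circular_path; infer_instance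

-- ===== CLAIM (what is proved, stated in full; the proofs are below) =====
def Claim_equal_get_circular_path : Prop := ∀ (n : Int) (m : Int), Dom_get_circular_path n m → Pre_get_circular_path n m → Spec_get_circular_path n m (get_circular_path n m)

-- ===== LEMMAS AND PROOFS =====

-- Python's % respects congruence mod n
theorem pmod_congr {n x y : Int} (h : n ∣ x - y) :
    PySem.Int.mod x n = PySem.Int.mod y n := by
  have hdvd : (n ∣ x) ↔ (n ∣ y) := by
    constructor
    · intro hx; have := dvd_sub hx h; simpa using this
    · intro hy; have := dvd_add h hy; simpa using this
  have hmod : x % n = y % n :=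
    Int.emod_eq_emod_iff_emod_sub_eq_zero.mpr (Int.emod_eq_zero_of_dvd h)
  have hc : (0 ≤ n ∨ n ∣ x) = (0 ≤ n ∨ n ∣ y) := by rw [eq_iff_iff]; tauto
  simp only [PySem.Int.mod, Int.fmod_eq_emod, hmod, hc]

theorem pmod_sub_self_dvd (x n : Int) : n ∣ PySem.Int.mod x n - x := by
  have h := PySem.Int.floordiv_mul_add_mod x n
  exact ⟨-(PySem.Int.floordiv x n), by linarith⟩

-- the Euclid loop on nonnegative arguments computes Nat.gcd
theorem gcdLoop_aux : ∀ (k : Nat) (a b : Int), b.natAbs ≤ k → 0 ≤ a → 0 ≤ b →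
    gcdLoop a b = (Nat.gcd a.natAbs b.natAbs : Int) := by
  intro k
  induction k with
  | zero =>
    intro a b hk ha hb
    have hb0 : b = 0 := by omega
    subst hb0
    rw [gcdLoop]
    simp [Int.natAbs_of_nonneg ha]
  | succ k ih =>
    intro a b hk ha hb
    by_cases hb0 : b = 0
    · subst hb0; rw [gcdLoop]; simp [Int.natAbs_of_nonneg ha]
    · have hbpos : 0 < b := lt_of_le_of_ne hb (Ne.symm hb0)
      rw [gcdLoop, dif_neg hb0]
      have hmod : PySem.Int.mod a b = a % b := PySem.Int.mod_eq_emod_of_pos hbpos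
      have hmnn : 0 ≤ a % b := Int.emod_nonneg a hb0
      have hlt := pmod_natAbs_lt a hb0
      rw [ih b (PySem.Int.mod a b) (by omega) hb (by rw [hmod]; exact hmnn)]
      congr 1
      rw [hmod, Int.natAbs_emod_of_nonneg ha b, Nat.gcd_comm, ← Nat.gcd_rec, Nat.gcd_comm]

-- n ∣ t·d  ↔  the cycle length |n|/gcd(|n|,|d|) divides t
theorem key_dvd (n d : Int) (hn : n ≠ 0) (t : Nat) :
    (n ∣ (t : Int) * d) ↔ (n.natAbs / Nat.gcd n.natAbs d.natAbs) ∣ t := by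
  have hN : 0 < n.natAbs := Int.natAbs_pos.mpr hn
  have hg : 0 < Nat.gcd n.natAbs d.natAbs := Nat.gcd_pos_of_pos_left _ hN
  have h1 : (n ∣ (t : Int) * d) ↔ n.natAbs ∣ t * d.natAbs := by
    rw [← Int.natAbs_dvd_natAbs, Int.natAbs_mul, Int.natAbs_natCast]
  obtain ⟨N', hN'⟩ := Nat.gcd_dvd_left n.natAbs d.natAbs
  obtain ⟨D', hD'⟩ := Nat.gcd_dvd_right n.natAbs d.natAbs
  set g := Nat.gcd n.natAbs d.natAbs with hgdef
  have hdivN : n.natAbs / g = N' := by rw [hN']; exact Nat.mul_div_cancel_left _ hg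
  have hdivD : d.natAbs / g = D' := by rw [hD']; exact Nat.mul_div_cancel_left _ hg
  have hco : Nat.Coprime N' D' := by
    have := Nat.coprime_div_gcd_div_gcd (m := n.natAbs) (n := d.natAbs) hg
    rwa [hdivN, hdivD] at this
  rw [h1, hdivN, hN', hD']
  constructor
  · intro h
    have h2 : N' ∣ t * D' := by
      refine (Nat.mul_dvd_mul_iff_left hg).mp ?_
      rwa [show t * (g * D') = g * (t * D') by ring] at h
    exact hco.dvd_of_dvd_mul_right h2
  · rintro ⟨s, rfl⟩
    exact ⟨s * D', by ring⟩

-- abbreviations for the proof: the step d, the cycle length P, the k-th emitted string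
def dd (n m : Int) : Int := PySem.Int.mod (m - 1) n
def PP (n m : Int) : Nat := n.natAbs / Nat.gcd n.natAbs (dd n m).natAbs
def ff (n m : Int) (t : Nat) : String := PySem.Int.toStr (PySem.Int.mod ((t : Int) * dd n m) n + 1)

-- A's update of `current` advances the closed form by one step
theorem step_mod (n m : Int) (k : Nat) :
    PySem.Int.mod (PySem.Int.mod ((k : Int) * dd n m) n + 1 + m - 2) n
      = PySem.Int.mod (((k + 1 : Nat) : Int) * dd n m) n := by
  apply pmod_congr
  have h1 := pmod_sub_self_dvd ((k : Int) * dd n m) n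
  have h2 := pmod_sub_self_dvd (m - 1) n
  have h3 := dvd_sub h1 h2
  have heq : PySem.Int.mod ((k : Int) * dd n m) n + 1 + m - 2 - ((k + 1 : Nat) : Int) * dd n m
      = (PySem.Int.mod ((k : Int) * dd n m) n - (k : Int) * dd n m)
        - (PySem.Int.mod (m - 1) n - (m - 1)) := by
    push_cast
    simp only [dd]
    ring
  rw [heq]
  exact h3

-- A's loop, started at the k-th position with enough fuel, emits the closed forms k..P-1
theorem loop_run (n m : Int) (hn : n ≠ 0) :
    ∀ (fuel k : Nat) (path : List String),
      k < PP n m → PP n m - k ≤ fuel →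
      loopA n m fuel (PySem.Int.mod ((k : Int) * dd n m) n + 1) path
        = path ++ (List.range (PP n m - k)).map (fun j => ff n m (k + j)) := by
  intro fuel k path hk hf
  induction fuel generalizing k path with
  | zero => exact absurd hk (by omega)
  | succ fuel ih =>
    show (if PySem.Int.mod (PySem.Int.mod ((k : Int) * dd n m) n + 1 + m - 2) n + 1 = 1
        then path ++ [PySem.Int.toStr (PySem.Int.mod ((k : Int) * dd n m) n + 1)]
        else loopA n m fuel (PySem.Int.mod (PySem.Int.mod ((k : Int) * dd n m) n + 1 + m - 2) n + 1)
          (path ++ [PySem.Int.toStr (PySem.Int.mod ((k : Int) * dd n m) n + 1)])) = _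
    rw [step_mod n m k]
    by_cases hPk : k + 1 = PP n m
    · have hdvd : n ∣ ((k + 1 : Nat) : Int) * dd n m :=
        (key_dvd n (dd n m) hn (k + 1)).mpr (hPk ▸ dvd_refl _)
      rw [if_pos (by rw [(PySem.Int.mod_eq_zero_iff_dvd _ _).mpr hdvd]; norm_num),
          show PP n m - k = 1 by omega, List.range_one]
      simp [ff]
    · have hlt : k + 1 < PP n m := by omega
      have hnd : ¬ n ∣ ((k + 1 : Nat) : Int) * dd n m := by
        intro hdvd
        have h2 : PP n m ∣ k + 1 := (key_dvd n (dd n m) hn (k + 1)).mp hdvd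
        exact absurd (Nat.le_of_dvd (by omega) h2) (by omega)
      have hne : PySem.Int.mod (((k + 1 : Nat) : Int) * dd n m) n + 1 ≠ 1 := by
        intro h
        exact hnd ((PySem.Int.mod_eq_zero_iff_dvd _ _).mp (by omega))
      rw [if_neg hne, ih (k + 1) _ hlt (by simp only [PP] at hf ⊢; omega)]
      rw [List.append_assoc]
      congr 1
      rw [show PP n m - k = (PP n m - (k + 1)) + 1 by omega, List.range_succ_eq_map]
      simp only [List.map_cons, List.map_map, List.singleton_append, Nat.add_zero]
      refine List.cons_eq_cons.mpr ⟨by simp [ff], List.map_congr_left fun j hj => ?_⟩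
      simp only [Function.comp, ff]
      have h : ((k : Int) + 1 + (j : Int)) = ((k : Int) + ((j : Int) + 1)) := by ring
      push_cast
      rw [h]

theorem main_eq (n m : Int) (hn : n ≠ 0) : get_circular_path n m = get_circular_path_alt n m := by
  have hN : 0 < n.natAbs := Int.natAbs_pos.mpr hn
  have hg : 0 < Nat.gcd n.natAbs (dd n m).natAbs := Nat.gcd_pos_of_pos_left _ hN
  have hP : 0 < PP n m :=
    Nat.div_pos (Nat.le_of_dvd hN (Nat.gcd_dvd_left _ _)) hg
  have hPN : PP n m ≤ n.natAbs := Nat.div_le_self _ _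
  have h0 : PySem.Int.mod (((0 : Nat) : Int) * dd n m) n + 1 = 1 := by
    simp [PySem.Int.mod, Int.zero_fmod]
  have hA : get_circular_path n m
      = PySem.Str.join "" ((List.range (PP n m)).map (fun j => ff n m j)) := by
    rw [get_circular_path, ← h0, loop_run n m hn n.natAbs 0 [] hP (by omega)]
    simp
  have hgl : gcdLoop |n| |dd n m| = (Nat.gcd n.natAbs (dd n m).natAbs : Int) := by
    rw [gcdLoop_aux (|dd n m|).natAbs |n| |dd n m| le_rfl (abs_nonneg n) (abs_nonneg _)]
    simp [Int.natAbs_abs]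
  have hfl : PySem.Int.floordiv |n| ((Nat.gcd n.natAbs (dd n m).natAbs : Nat) : Int)
      = ((PP n m : Nat) : Int) := by
    rw [Int.abs_eq_natAbs]
    exact_mod_cast PySem.Int.floordiv_natCast n.natAbs (Nat.gcd n.natAbs (dd n m).natAbs)
  rw [hA]
  show _ = PySem.Str.join ""
    ((PySem.List.pyRange 0 (PySem.Int.floordiv |n| (gcdLoop |n| |PySem.Int.mod (m - 1) n|)) 1).map
      (fun k => PySem.Int.toStr (PySem.Int.mod (k * PySem.Int.mod (m - 1) n) n + 1)))
  rw [show PySem.Int.mod (m - 1) n = dd n m from rfl, hgl, hfl,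
      PySem.List.pyRange_zero_natCast, List.map_map]
  rfl

-- ===== VERDICT (by name: the statement is the Claim_ definition above) =====
theorem get_circular_path_spec : Claim_equal_get_circular_path := by
  intro n m _ hn
  show get_circular_path n m = get_circular_path_alt n m
  exact main_eq n m hn
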